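-- pv_equiv track=rewrite | github.com/ljcleo/hardcore-logic | prepare/src/skyscraper/gen-04-p.py | _calc_visibility_sum
-- ===== SOURCE A (Python) =====
-- from typing import List, Optional, Tuple
--
-- def _calc_visibility_sum(grid: List[List[int]], size: int) -> List[List[int]]:
--     top, bottom, left, right = [], [], [], []
--     for col in range(size):
--         max_h, sum_h = 0, 0
--         for row in range(size):
--             if grid[row][col] > max_h:
--                 sum_h += grid[row][col]
--                 max_h = grid[row][col]
--         top.append(sum_h)
--     for col in range(size):
--         max_h, sum_h = 0, 0
--         for row in range(size-1, -1, -1):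
--             if grid[row][col] > max_h:
--                 sum_h += grid[row][col]
--                 max_h = grid[row][col]
--         bottom.append(sum_h)
--     for row in range(size):
--         max_h, sum_h = 0, 0
--         for col in range(size):
--             if grid[row][col] > max_h:
--                 sum_h += grid[row][col]
--                 max_h = grid[row][col]
--         left.append(sum_h)
--     for row in range(size):
--         max_h, sum_h = 0, 0
--         for col in range(size-1, -1, -1):
--             if grid[row][col] > max_h:
--                 sum_h += grid[row][col]
--                 max_h = grid[row][col]
--         right.append(sum_h)
--     return [top, bottom, left, right]
-- ===== SOURCE B (Python) =====
-- from typing import List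
--
--
-- def _calc_visibility_sum(grid: List[List[int]], size: int) -> List[List[int]]:
--     def vis_sum(line):
--         total, seen = 0, []
--         for h in line:
--             if h > 0 and all(g < h for g in seen):
--                 total += h
--             seen.append(h)
--         return total
--
--     n = max(size, 0)
--     rows = [r[:n] for r in grid[:n]]
--     cols = [[row[c] for row in rows] for c in range(n)]
--     return [
--         [vis_sum(c) for c in cols],
--         [vis_sum(c[::-1]) for c in cols],
--         [vis_sum(r) for r in rows],
--         [vis_sum(r[::-1]) for r in rows],
--     ]
-- ===== Notes on version B (the rewrite author's own statement) =====
-- stated objective: alternative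
-- what changed: Drops the running-maximum state entirely: each element is counted by a stateless brute-force dominance test (it is visible iff positive and strictly greater than every element of the explicit prefix list), applied to materialized row/column lines, instead of A's four nested index loops each threading a running max.
import Mathlib
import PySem

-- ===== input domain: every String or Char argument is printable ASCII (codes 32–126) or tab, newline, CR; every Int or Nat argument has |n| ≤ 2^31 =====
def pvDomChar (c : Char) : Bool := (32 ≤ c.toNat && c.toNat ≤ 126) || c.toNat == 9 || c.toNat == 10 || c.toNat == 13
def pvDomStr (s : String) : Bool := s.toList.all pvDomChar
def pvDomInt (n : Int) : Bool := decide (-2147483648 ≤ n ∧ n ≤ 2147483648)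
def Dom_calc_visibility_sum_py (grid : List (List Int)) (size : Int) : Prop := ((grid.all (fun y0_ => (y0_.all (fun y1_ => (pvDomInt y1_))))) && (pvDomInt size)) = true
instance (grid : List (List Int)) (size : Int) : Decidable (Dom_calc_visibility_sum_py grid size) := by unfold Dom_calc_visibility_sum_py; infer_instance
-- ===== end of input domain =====

-- B drops A's running-maximum state: each element is counted by a stateless brute-force
-- dominance test against the explicit prefix list of its materialized line (alternative).

-- ===== PORT A =====
-- grid[row][col]; total form, valid under Pre_ (both indices in range there)
def pvGetA (grid : List (List Int)) (r c : Int) : Int :=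
  PySem.List.pyGetD (PySem.List.pyGetD grid r []) c 0

def calc_visibility_sum_py (grid : List (List Int)) (size : Int) : List (List Int) :=
  let top := (PySem.List.pyRange 0 size 1).map (fun col =>
    ((PySem.List.pyRange 0 size 1).foldl (fun (st : Int × Int) row =>
       if pvGetA grid row col > st.1 then (pvGetA grid row col, st.2 + pvGetA grid row col) else st) (0, 0)).2)
  let bottom := (PySem.List.pyRange 0 size 1).map (fun col =>
    ((PySem.List.pyRange (size - 1) (-1) (-1)).foldl (fun (st : Int × Int) row =>
       if pvGetA grid row col > st.1 then (pvGetA grid row col, st.2 + pvGetA grid row col) else st) (0, 0)).2)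
  let left := (PySem.List.pyRange 0 size 1).map (fun row =>
    ((PySem.List.pyRange 0 size 1).foldl (fun (st : Int × Int) col =>
       if pvGetA grid row col > st.1 then (pvGetA grid row col, st.2 + pvGetA grid row col) else st) (0, 0)).2)
  let right := (PySem.List.pyRange 0 size 1).map (fun row =>
    ((PySem.List.pyRange (size - 1) (-1) (-1)).foldl (fun (st : Int × Int) col =>
       if pvGetA grid row col > st.1 then (pvGetA grid row col, st.2 + pvGetA grid row col) else st) (0, 0)).2)
  [top, bottom, left, right]

-- ===== PORT B =====
-- vis_sum(line): state (total, seen); 'all(g < h for g in seen)' as a decidable ∀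
def pvVisB (line : List Int) : Int :=
  (line.foldl (fun (st : Int × List Int) h =>
      (if h > 0 ∧ ∀ g ∈ st.2, g < h then st.1 + h else st.1, st.2 ++ [h])) (0, [])).1

def calc_visibility_sum_py_alt (grid : List (List Int)) (size : Int) : List (List Int) :=
  let n : Int := max size 0
  let rows := (PySem.List.slice grid none (some n)).map (fun r => PySem.List.slice r none (some n))
  let cols := (PySem.List.pyRange 0 n 1).map (fun c => rows.map (fun row => PySem.List.pyGetD row c 0))
  [cols.map pvVisB,
   cols.map (fun c => pvVisB c.reverse),   -- c[::-1] is List.reverse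
   rows.map pvVisB,
   rows.map (fun r => pvVisB r.reverse)]

-- ===== PRECONDITION & SPEC =====
-- A indexes grid[row][col] for 0 ≤ row, col < size: it raises IndexError unless the grid
-- has at least size rows whose first size entries exist.
def Pre_calc_visibility_sum_py (grid : List (List Int)) (size : Int) : Prop :=
  size ≤ (grid.length : Int) ∧ ∀ r ∈ grid.take size.toNat, size ≤ (r.length : Int)
instance (grid : List (List Int)) (size : Int) : Decidable (Pre_calc_visibility_sum_py grid size) := by unfold Pre_calc_visibility_sum_py; infer_instance

def pvWitness_calc_visibility_sum_py : List (List Int) × Int := ([[1, 2], [3, 4]], 2)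

def Spec_calc_visibility_sum_py (grid : List (List Int)) (size : Int) (out : List (List Int)) : Prop := out = calc_visibility_sum_py_alt grid size
instance (grid : List (List Int)) (size : Int) (out : List (List Int)) : Decidable (Spec_calc_visibility_sum_py grid size out) := by unfold Spec_calc_visibility_sum_py; infer_instance

-- ===== CLAIM (what is proved, stated in full; the proofs are below) =====
def Claim_equal_calc_visibility_sum_py : Prop := ∀ (grid : List (List Int)) (size : Int), Dom_calc_visibility_sum_py grid size → Pre_calc_visibility_sum_py grid size → Spec_calc_visibility_sum_py grid size (calc_visibility_sum_py grid size)

-- ===== LEMMAS AND PROOFS =====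

-- x beats the running max of seen (seeded with 0) iff it is positive and beats every element
theorem pv_gt_foldl_max (x : Int) : ∀ (l : List Int) (m : Int),
    (x > l.foldl max m) ↔ (x > m ∧ ∀ g ∈ l, g < x) := by
  intro l
  induction l with
  | nil => intro m; simp
  | cons a t ih =>
      intro m
      simp only [List.foldl_cons, ih (max m a), max_lt_iff, List.mem_cons]
      constructor
      · rintro ⟨⟨hm, ha⟩, ht⟩
        exact ⟨hm, fun g hg => hg.elim (fun h => h ▸ ha) (ht g)⟩
      · rintro ⟨hm, hall⟩
        exact ⟨⟨hm, hall a (Or.inl rfl)⟩, fun g hg => hall g (Or.inr hg)⟩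

-- B's prefix-list fold equals A's running-max fold (with the max of the prefix as seed)
theorem pv_bridge : ∀ (l : List Int) (s : Int) (seen : List Int),
    (l.foldl (fun (st : Int × List Int) h =>
        (if h > 0 ∧ ∀ g ∈ st.2, g < h then st.1 + h else st.1, st.2 ++ [h])) (s, seen)).1
      = (l.foldl (fun (st : Int × Int) h =>
        if h > st.1 then (h, st.2 + h) else st) (seen.foldl max 0, s)).2 := by
  intro l
  induction l with
  | nil => intro s seen; rfl
  | cons a t ih =>
      intro s seen
      simp only [List.foldl_cons]
      have hcond : (a > 0 ∧ ∀ g ∈ seen, g < a) ↔ a > seen.foldl max 0 :=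
        (pv_gt_foldl_max a seen 0).symm
      have happ : (seen ++ [a]).foldl max 0 = max (seen.foldl max 0) a := by
        simp [List.foldl_append]
      by_cases h : a > seen.foldl max 0
      · rw [if_pos (hcond.mpr h), if_pos h, ih]
        congr 1
        rw [happ, max_eq_right (le_of_lt h)]
      · rw [if_neg (fun hc => h (hcond.mp hc)), if_neg h, ih]
        congr 1
        rw [happ, max_eq_left (le_of_not_gt h)]

-- A's inner index loop is B's vis_sum of the materialized line.
theorem pv_inner (R : List Int) (g : Int → Int) :
    (R.foldl (fun (st : Int × Int) i =>
        if g i > st.1 then (g i, st.2 + g i) else st) (0, 0)).2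
      = pvVisB (R.map g) := by
  unfold pvVisB
  rw [pv_bridge, List.foldl_map]
  rfl

-- Under Pre_, the trimmed row matrix of B is the index matrix A reads.
theorem pv_rows_eq (grid : List (List Int)) (size : Int)
    (hpre : Pre_calc_visibility_sum_py grid size) :
    (grid.take size.toNat).map (fun r => r.take size.toNat)
      = (PySem.List.pyRange 0 size 1).map (fun r =>
          (PySem.List.pyRange 0 size 1).map (fun c => pvGetA grid r c)) := by
  obtain ⟨h1, h2⟩ := hpre
  apply List.ext_getElem
  · simp [PySem.List.length_pyRange_one]
    omega
  · intro k hk1 hk2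
    simp only [List.getElem_map, PySem.List.getElem_pyRange_one, zero_add]
    have hklen : k < grid.length := by
      simp [PySem.List.length_pyRange_one] at hk2; omega
    have hrowmem : grid[k] ∈ grid.take size.toNat := by
      refine List.mem_take_iff_getElem.mpr ⟨k, ?_, ?_⟩
      · simp [PySem.List.length_pyRange_one] at hk2; omega
      · simp
    have hrowlen : size ≤ (grid[k].length : Int) := h2 _ hrowmem
    apply List.ext_getElem
    · simp [PySem.List.length_pyRange_one]
      omega
    · intro j hj1 hj2
      have hjn : j < size.toNat := by
        simp [PySem.List.length_pyRange_one] at hj2; omega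
      simp only [List.getElem_take, List.getElem_map, PySem.List.getElem_pyRange_one, zero_add]
      simp only [pvGetA, PySem.List.pyGetD_natCast]
      rw [List.getD_eq_getElem _ _ hklen, List.getD_eq_getElem _ _ (by omega)]

-- the column of the index matrix at c ∈ [0, size)
theorem pv_col_eq (grid : List (List Int)) (size c : Int) (hc0 : 0 ≤ c) (hc1 : c < size) :
    ((PySem.List.pyRange 0 size 1).map (fun r =>
        (PySem.List.pyRange 0 size 1).map (fun c' => pvGetA grid r c'))).map
      (fun row => PySem.List.pyGetD row c 0)
    = (PySem.List.pyRange 0 size 1).map (fun r => pvGetA grid r c) := by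
  rw [List.map_map]
  apply List.map_congr_left
  intro r _
  exact PySem.List.pyGetD_map_pyRange_of_nonneg _ size c 0 hc0 hc1

-- ===== VERDICT (by name: the statement is the Claim_ definition above) =====
theorem calc_visibility_sum_py_spec : Claim_equal_calc_visibility_sum_py := by
  intro grid size _ hpre
  unfold Spec_calc_visibility_sum_py calc_visibility_sum_py calc_visibility_sum_py_alt
  have hmax : (max size 0).toNat = size.toNat := by omega
  have hrange : PySem.List.pyRange 0 (max size 0) 1 = PySem.List.pyRange 0 size 1 := by
    rw [PySem.List.pyRange_one, PySem.List.pyRange_one]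
    simp [hmax]
  have hrows : (PySem.List.slice grid none (some (max size 0))).map
        (fun r => PySem.List.slice r none (some (max size 0)))
      = (PySem.List.pyRange 0 size 1).map (fun r =>
          (PySem.List.pyRange 0 size 1).map (fun c => pvGetA grid r c)) := by
    rw [PySem.List.slice_to _ (le_max_right size 0)]
    have hs : ∀ r : List Int, PySem.List.slice r none (some (max size 0)) = r.take size.toNat := by
      intro r; rw [PySem.List.slice_to _ (le_max_right size 0), hmax]
    simp only [hs, hmax]
    exact pv_rows_eq grid size hpre
  have hrevrange : PySem.List.pyRange (size - 1) (-1) (-1)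
      = (PySem.List.pyRange 0 size 1).reverse := by
    rw [PySem.List.pyRange_neg_one_eq_reverse]
    norm_num
  simp only [hrange, hrows, hrevrange]
  simp only [List.cons.injEq, and_true]
  refine ⟨?_, ?_, ?_, ?_⟩
  · -- top
    rw [List.map_map]
    apply List.map_congr_left
    intro c hc
    obtain ⟨hc0, hc1⟩ := PySem.List.mem_pyRange_one.mp hc
    simp only [Function.comp_apply]
    rw [pv_col_eq grid size c hc0 hc1, pv_inner]
  · -- bottom
    rw [List.map_map]
    apply List.map_congr_left
    intro c hc
    obtain ⟨hc0, hc1⟩ := PySem.List.mem_pyRange_one.mp hc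
    simp only [Function.comp_apply]
    rw [pv_col_eq grid size c hc0 hc1, pv_inner, List.map_reverse]
  · -- left
    rw [List.map_map]
    apply List.map_congr_left
    intro r _
    simp only [Function.comp_apply]
    rw [pv_inner]
  · -- right
    rw [List.map_map]
    apply List.map_congr_left
    intro r _
    simp only [Function.comp_apply]
    rw [pv_inner, List.map_reverse]
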